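-- pv_equiv track=rewrite | github.com/Addreoran/BSH | merge_by_cd_hit_res.py | merge_by_clusters
-- ===== SOURCE A (Python) =====
-- def merge_by_clusters(clusters, stats_file):
--     stats_file_tmp = {}
--     for file, genes_data in stats_file.items():
--         new_stats = {}
--         stats_file_tmp[file] = {}
--         for cluster, proteins_in_cl in clusters.items():
--             proteins_in_cl = list(proteins_in_cl)
--             if len(proteins_in_cl) == 1:
--                 if proteins_in_cl[0] in new_stats:
--                     new_stats[proteins_in_cl[0]] = genes_data[proteins_in_cl[0]]
--             else:
--                 for prot in proteins_in_cl:
--                     if prot in stats_file[file]: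
--                         if f"cluster_{cluster}" not in new_stats:
--                             new_stats[f"cluster_{cluster}"] = genes_data[prot]
--                         else:
--                             new_stats[f"cluster_{cluster}"] += genes_data[prot]
--         stats_file_tmp[file] = new_stats
--     return stats_file_tmp
-- ===== SOURCE B (Python) =====
-- def merge_by_clusters(clusters, stats_file):
--     # Invert once: protein -> slots of multi-protein clusters containing it,
--     # then each file only walks its own genes plus one pass over the cluster slots.
--     multis = []            # output key of each multi-protein cluster, in cluster order
--     index = {}             # protein -> list of slots (positions in multis), with multiplicity
--     for cluster, proteins in clusters.items():
--         proteins = list(proteins)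
--         if len(proteins) != 1:
--             slot = len(multis)
--             multis.append("cluster_" + cluster)
--             for p in proteins:
--                 index.setdefault(p, []).append(slot)
--     result = {}
--     for file, genes_data in stats_file.items():
--         acc = {}
--         for gene, value in genes_data.items():
--             for slot in index.get(gene, ()):
--                 acc[slot] = acc.get(slot, 0) + value
--         result[file] = {multis[slot]: acc[slot] for slot in range(len(multis)) if slot in acc}
--     return result
-- ===== Notes on version B (the rewrite author's own statement) =====
-- stated objective: faster
-- what changed: Instead of rescanning every protein of every cluster for every file, B builds a protein-to-cluster-slot index once and then, per file, accumulates sums over only the genes present in that file, emitting hit clusters in slot order.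
-- intended difference: On inputs where some cluster holds a single protein literally named 'cluster_<c>' for an earlier multi-protein cluster c that has a gene present in a file, that name is itself a gene of the file, and that gene's value differs from cluster c's per-file sum, A's mistyped 'if proteins_in_cl[0] in new_stats' branch fires and overwrites cluster c's sum with that single gene's value; B keeps the sum, which is the intended aggregation (the branch is an evident typo for membership in the file's genes). — e.g. on merge_by_clusters([("a", ["x", "y"]), ("b", ["cluster_a"])], [("f", [("x", 1), ("y", 2), ("cluster_a", 5)])]): A returns [("f", [("cluster_a", 5)])], B returns [("f", [("cluster_a", 3)])]
import Mathlib
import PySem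

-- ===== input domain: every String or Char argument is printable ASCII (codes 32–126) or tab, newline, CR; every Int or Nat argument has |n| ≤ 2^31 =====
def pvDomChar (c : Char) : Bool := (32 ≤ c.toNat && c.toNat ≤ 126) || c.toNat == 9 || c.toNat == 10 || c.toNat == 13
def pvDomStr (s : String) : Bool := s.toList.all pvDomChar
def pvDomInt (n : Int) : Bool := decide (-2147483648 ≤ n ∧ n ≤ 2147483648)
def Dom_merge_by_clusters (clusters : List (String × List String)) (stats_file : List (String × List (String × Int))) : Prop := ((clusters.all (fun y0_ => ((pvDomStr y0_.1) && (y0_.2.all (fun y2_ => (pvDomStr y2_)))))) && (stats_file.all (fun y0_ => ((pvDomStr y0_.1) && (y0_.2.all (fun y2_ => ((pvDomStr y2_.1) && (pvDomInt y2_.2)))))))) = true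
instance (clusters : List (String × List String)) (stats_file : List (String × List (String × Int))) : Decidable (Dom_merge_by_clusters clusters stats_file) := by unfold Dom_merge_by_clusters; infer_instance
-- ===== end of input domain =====

-- B inverts the clusters into a protein→slot index once, so each file only walks its own
-- genes plus one pass over the cluster slots, instead of rescanning every cluster's proteins.

-- ===== PORT A =====
-- A's dicts are ported as PySem.Dict; the association-list arguments are the dicts' items
-- (unique keys, mirrored by Pre_), so `stats_file[file]` is the same dict as `genes_data`.
-- Python's `genes_data[prot]` is guarded by `prot in stats_file[file]` on the multi-protein
-- branch; on the singleton branch it can raise KeyError — exactly those inputs are outside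
-- Pre_ (getD 0 is used as the total form there).
def pvAInner (gdD : PySem.Dict String Int) (k : String) (ns : PySem.Dict String Int) (ps : List String) : PySem.Dict String Int :=
  ps.foldl (fun ns prot =>
    if gdD.contains prot then
      if ns.contains k then ns.insert k (ns.getD k 0 + gdD.getD prot 0)
      else ns.insert k (gdD.getD prot 0)
    else ns) ns

def pvAFile (clusters : List (String × List String)) (gdD : PySem.Dict String Int) : PySem.Dict String Int :=
  clusters.foldl (fun new_stats cl =>
    if cl.2.length == 1 then
      if new_stats.contains (cl.2.headD "") then new_stats.insert (cl.2.headD "") (gdD.getD (cl.2.headD "") 0)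
      else new_stats
    else pvAInner gdD ("cluster_" ++ cl.1) new_stats cl.2) PySem.Dict.empty

-- `stats_file_tmp[file] = {}` immediately followed by `stats_file_tmp[file] = new_stats`
-- is ported as the single (equal) insert of new_stats.
def merge_by_clusters (clusters : List (String × List String)) (stats_file : List (String × List (String × Int))) : List (String × List (String × Int)) :=
  (stats_file.foldl (fun tmp fg => tmp.insert fg.1 (pvAFile clusters (PySem.Dict.mk fg.2)).items) PySem.Dict.empty).items

-- ===== PORT B =====
def pvBIndex (clusters : List (String × List String)) : List String × PySem.Dict String (List Int) :=
  clusters.foldl (fun mi cl =>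
    if cl.2.length != 1 then
      (mi.1 ++ ["cluster_" ++ cl.1],
       cl.2.foldl (fun ix p => ix.modify p [] (fun l => l ++ [(mi.1.length : Int)])) mi.2)
    else mi) ([], PySem.Dict.empty)

def pvBFile (multis : List String) (index : PySem.Dict String (List Int)) (gd : List (String × Int)) : List (String × Int) :=
  let acc := gd.foldl (fun acc gv => (index.getD gv.1 []).foldl (fun a s => a.modify s 0 (fun x => x + gv.2)) acc) (PySem.Dict.empty : PySem.Dict Int Int)
  ((PySem.List.pyRange 0 (multis.length : Int) 1).foldl (fun out s =>
      if acc.contains s then out.insert (PySem.List.pyGetD multis s "") (acc.getD s 0) else out)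
    (PySem.Dict.empty : PySem.Dict String Int)).items

def merge_by_clusters_alt (clusters : List (String × List String)) (stats_file : List (String × List (String × Int))) : List (String × List (String × Int)) :=
  let mi := pvBIndex clusters
  (stats_file.foldl (fun res fg => res.insert fg.1 (pvBFile mi.1 mi.2 fg.2)) PySem.Dict.empty).items

-- ===== PRECONDITION & SPEC =====
-- Pre_ excludes association lists with duplicate keys (they cannot arise from A's dict
-- arguments) and the inputs on which A's singleton branch raises KeyError: a cluster whose
-- single protein is named "cluster_<c>" for an earlier multi-protein cluster c with a gene
-- in some file, that name not itself being a gene of that file.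
def Pre_merge_by_clusters (clusters : List (String × List String)) (stats_file : List (String × List (String × Int))) : Prop :=
  (clusters.map Prod.fst).Nodup ∧ (stats_file.map Prod.fst).Nodup ∧
  (∀ fg ∈ stats_file, (fg.2.map Prod.fst).Nodup) ∧
  ¬ ∃ fg ∈ stats_file, ∃ ci ∈ clusters.zipIdx, ∃ a ∈ clusters.take ci.2,
      a.2.length ≠ 1 ∧ ci.1.2 = ["cluster_" ++ a.1] ∧
      ("cluster_" ++ a.1) ∉ fg.2.map Prod.fst ∧ ∃ q ∈ a.2, q ∈ fg.2.map Prod.fst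
instance (clusters : List (String × List String)) (stats_file : List (String × List (String × Int))) : Decidable (Pre_merge_by_clusters clusters stats_file) := by unfold Pre_merge_by_clusters; infer_instance

def pvWitness_merge_by_clusters : (List (String × List String)) × (List (String × List (String × Int))) :=
  ([("a", ["x", "y"])], [("f", [("x", 1), ("y", 2)])])

-- On inputs where some cluster holds a single protein named "cluster_<c>" for an earlier
-- multi-protein cluster c with a gene present in a file, that name is itself a gene of the
-- file, and that gene's value differs from cluster c's per-file sum, A's mistyped
-- `if proteins_in_cl[0] in new_stats` overwrites cluster c's sum with that gene's value;
-- B keeps the sum, the intended aggregation.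
def D_merge_by_clusters (clusters : List (String × List String)) (stats_file : List (String × List (String × Int))) : Prop :=
  ∃ fg ∈ stats_file, ∃ ci ∈ clusters.zipIdx, ∃ a ∈ clusters.take ci.2, ∃ gv ∈ fg.2,
    a.2.length ≠ 1 ∧ gv.1 = "cluster_" ++ a.1 ∧ ci.1.2 = [gv.1] ∧ (∃ q ∈ a.2, q ∈ fg.2.map Prod.fst) ∧
    gv.2 ≠ (fg.2.map (fun x => a.2.count x.1 • x.2)).sum
instance (clusters : List (String × List String)) (stats_file : List (String × List (String × Int))) : Decidable (D_merge_by_clusters clusters stats_file) := by unfold D_merge_by_clusters; infer_instance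

def Spec_merge_by_clusters (clusters : List (String × List String)) (stats_file : List (String × List (String × Int))) (out : List (String × List (String × Int))) : Prop :=
  ¬ D_merge_by_clusters clusters stats_file → out = merge_by_clusters_alt clusters stats_file
instance (clusters : List (String × List String)) (stats_file : List (String × List (String × Int))) (out : List (String × List (String × Int))) : Decidable (Spec_merge_by_clusters clusters stats_file out) := by unfold Spec_merge_by_clusters; infer_instance

def pvDiffWitness_merge_by_clusters : (List (String × List String)) × (List (String × List (String × Int))) :=
  ([("a", ["x", "y"]), ("b", ["cluster_a"])], [("f", [("x", 1), ("y", 2), ("cluster_a", 5)])])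

def pvDiffWitnessOut_merge_by_clusters : (List (String × List (String × Int))) × (List (String × List (String × Int))) :=
  ([("f", [("cluster_a", 5)])], [("f", [("cluster_a", 3)])])

-- ===== CLAIM (what is proved, stated in full; the proofs are below) =====
def Claim_unchanged_merge_by_clusters : Prop := ∀ (clusters : List (String × List String)) (stats_file : List (String × List (String × Int))), Dom_merge_by_clusters clusters stats_file → Pre_merge_by_clusters clusters stats_file → Spec_merge_by_clusters clusters stats_file (merge_by_clusters clusters stats_file)
def Claim_changed_merge_by_clusters : Prop := Dom_merge_by_clusters (pvDiffWitness_merge_by_clusters.1) (pvDiffWitness_merge_by_clusters.2) ∧ Pre_merge_by_clusters (pvDiffWitness_merge_by_clusters.1) (pvDiffWitness_merge_by_clusters.2) ∧ D_merge_by_clusters (pvDiffWitness_merge_by_clusters.1) (pvDiffWitness_merge_by_clusters.2) ∧ merge_by_clusters (pvDiffWitness_merge_by_clusters.1) (pvDiffWitness_merge_by_clusters.2) = pvDiffWitnessOut_merge_by_clusters.1 ∧ merge_by_clusters_alt (pvDiffWitness_merge_by_clusters.1) (pvDiffWitness_merge_by_clusters.2) = pvDiffWitnessOut_merge_by_clusters.2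 ∧ pvDiffWitnessOut_merge_by_clusters.1 ≠ pvDiffWitnessOut_merge_by_clusters.2
def Claim_exact_merge_by_clusters : Prop := ∀ (clusters : List (String × List String)) (stats_file : List (String × List (String × Int))), Dom_merge_by_clusters clusters stats_file → Pre_merge_by_clusters clusters stats_file → D_merge_by_clusters clusters stats_file → merge_by_clusters clusters stats_file ≠ merge_by_clusters_alt clusters stats_file

-- ===== LEMMAS AND PROOFS =====

-- proof-layer abbreviations
def pvKey (cl : String × List String) : String := "cluster_" ++ cl.1
def pvHit (G : PySem.Dict String Int) (ps : List String) : Bool := ps.any (fun q => G.contains q)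
def pvGood (G : PySem.Dict String Int) (cl : String × List String) : Bool := cl.2.length != 1 && pvHit G cl.2
def pvS (G : PySem.Dict String Int) (ps : List String) : Int := ((ps.filter (fun q => G.contains q)).map (fun q => G.getD q 0)).sum
def pvSlots (b : Nat) (mcls : List (String × List String)) (g : String) : List Int :=
  match mcls with
  | [] => []
  | cl :: r => List.replicate (cl.2.count g) (b : Int) ++ pvSlots (b + 1) r g

theorem pvSum_smul (ps : List String) (gd : List (String × Int)) :
    (gd.map (fun x => ps.count x.1 • x.2)).sum = (gd.map (fun x => x.2 * (ps.count x.1 : Int))).sum := by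
  apply congrArg
  apply List.map_congr_left
  intro x _
  rw [nsmul_eq_mul, mul_comm]

-- ---- A side ----

theorem pvS_cons_pos (G : PySem.Dict String Int) (q : String) (rest : List String)
    (hq : G.contains q = true) : pvS G (q :: rest) = G.getD q 0 + pvS G rest := by
  simp [pvS, hq]

theorem pvS_cons_neg (G : PySem.Dict String Int) (q : String) (rest : List String)
    (hq : G.contains q = false) : pvS G (q :: rest) = pvS G rest := by
  simp [pvS, hq]

theorem pvS_of_not_hit (G : PySem.Dict String Int) (ps : List String) (h : pvHit G ps = false) : pvS G ps = 0 := by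
  unfold pvS
  have hnil : ps.filter (fun q => G.contains q) = [] := by
    rw [List.filter_eq_nil_iff]
    intro q hq
    have := List.any_eq_false.mp h q hq
    simp [this]
  rw [hnil]
  rfl

theorem pvAInner_eq (G : PySem.Dict String Int) (k : String) (ps : List String) :
    ∀ ns : PySem.Dict String Int, pvAInner G k ns ps =
      if pvHit G ps then ns.insert k (ns.getD k 0 + pvS G ps) else ns := by
  induction ps with
  | nil => intro ns; simp [pvAInner, pvHit]
  | cons q rest ih =>
    intro ns
    by_cases hq : G.contains q
    · have h1 : pvAInner G k ns (q :: rest) = pvAInner G k (ns.insert k (ns.getD k 0 + G.getD q 0)) rest := by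
        unfold pvAInner
        simp only [List.foldl_cons, hq, if_true]
        by_cases hc : ns.contains k
        · simp [hc]
        · have hc' : ns.contains k = false := by simpa using hc
          rw [PySem.Dict.getD_of_not_contains _ _ hc', zero_add]
          simp [hc']
      have hh : pvHit G (q :: rest) = true := by simp [pvHit, hq]
      rw [h1, ih, hh, if_pos rfl, pvS_cons_pos G q rest hq]
      by_cases hrest : pvHit G rest
      · rw [if_pos hrest, PySem.Dict.getD_insert_self, PySem.Dict.insert_insert_self, add_assoc]
      · rw [if_neg (by simp [hrest]), pvS_of_not_hit G rest (by simpa using hrest)]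
        ring_nf
    · have h1 : pvAInner G k ns (q :: rest) = pvAInner G k ns rest := by
        unfold pvAInner
        simp only [List.foldl_cons]
        simp [hq]
      have hh : pvHit G (q :: rest) = pvHit G rest := by simp [pvHit, hq]
      rw [h1, ih, hh, pvS_cons_neg G q rest (by simpa using hq)]

-- ---- B side: index build ----

theorem pvBIndex_inner (s : Int) (g : String) (ps : List String) :
    ∀ ix : PySem.Dict String (List Int),
    (ps.foldl (fun ix p => ix.modify p [] (fun l => l ++ [s])) ix).getD g [] =
      ix.getD g [] ++ List.replicate (ps.count g) s := by
  induction ps with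
  | nil => intro ix; simp
  | cons p rest ih =>
    intro ix
    simp only [List.foldl_cons]
    rw [ih]
    rw [PySem.Dict.getD_modify]
    by_cases h : g = p
    · subst h
      simp [List.replicate_succ]
    · have : (p == g) = false := by simp [Ne.symm h]
      simp [List.count_cons, this, h]

theorem pvBIndex_spec (g : String) :
    ∀ (cls : List (String × List String)) (ms : List String) (ix : PySem.Dict String (List Int)),
    (cls.foldl (fun mi cl =>
      if cl.2.length != 1 then
        (mi.1 ++ ["cluster_" ++ cl.1],
         cl.2.foldl (fun ix p => ix.modify p [] (fun l => l ++ [(mi.1.length : Int)])) mi.2)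
      else mi) (ms, ix)).1 = ms ++ (cls.filter (fun cl => cl.2.length != 1)).map pvKey ∧
    (cls.foldl (fun mi cl =>
      if cl.2.length != 1 then
        (mi.1 ++ ["cluster_" ++ cl.1],
         cl.2.foldl (fun ix p => ix.modify p [] (fun l => l ++ [(mi.1.length : Int)])) mi.2)
      else mi) (ms, ix)).2.getD g [] =
      ix.getD g [] ++ pvSlots ms.length (cls.filter (fun cl => cl.2.length != 1)) g := by
  intro cls
  induction cls with
  | nil => intro ms ix; simp [pvSlots]
  | cons cl rest ih =>
    intro ms ix
    simp only [List.foldl_cons, List.filter_cons]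
    by_cases hl : cl.2.length != 1
    · rw [if_pos hl, if_pos hl]
      obtain ⟨ih1, ih2⟩ := ih (ms ++ ["cluster_" ++ cl.1])
        (cl.2.foldl (fun ix p => ix.modify p [] (fun l => l ++ [(ms.length : Int)])) ix)
      constructor
      · rw [ih1]; simp [pvKey]
      · rw [ih2, pvBIndex_inner, pvSlots]
        simp [List.append_assoc]
    · rw [if_neg (by simpa using hl), if_neg (by simpa using hl)]
      exact ih ms ix

theorem pvSlots_mem (g : String) :
    ∀ (mcls : List (String × List String)) (b : Nat) (x : Int), x ∈ pvSlots b mcls g →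
      ∃ j, j < mcls.length ∧ x = ((b + j : Nat) : Int) := by
  intro mcls
  induction mcls with
  | nil => intro b x hx; simp [pvSlots] at hx
  | cons cl r ih =>
    intro b x hx
    rw [pvSlots, List.mem_append] at hx
    rcases hx with hx | hx
    · exact ⟨0, by simp, by simpa using (List.eq_of_mem_replicate hx)⟩
    · obtain ⟨j, hj, hx⟩ := ih (b + 1) x hx
      exact ⟨j + 1, by simpa using Nat.succ_lt_succ hj, by rw [hx]; congr 1; omega⟩

theorem pvSlots_count (g : String) :
    ∀ (mcls : List (String × List String)) (b j : Nat) (h : j < mcls.length),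
      (pvSlots b mcls g).count ((b + j : Nat) : Int) = mcls[j].2.count g := by
  intro mcls
  induction mcls with
  | nil => intro b j h; simp at h
  | cons cl r ih =>
    intro b j h
    rw [pvSlots, List.count_append]
    match j with
    | 0 =>
      have h0 : (((b : Int)) == ((b + 0 : Nat) : Int)) = true := by
        simp
      rw [List.count_replicate, if_pos h0]
      have hz : (pvSlots (b + 1) r g).count ((b + 0 : Nat) : Int) = 0 := by
        rw [List.count_eq_zero]
        intro hmem
        obtain ⟨j', _, hj'⟩ := pvSlots_mem g r (b + 1) _ hmem
        have : b + 0 = b + 1 + j' := by exact_mod_cast hj'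
        omega
      rw [hz]
      simp
    | j' + 1 =>
      have h0 : (((b : Int)) == ((b + (j' + 1) : Nat) : Int)) = false := by
        rw [beq_eq_false_iff_ne]
        intro hcontra
        have : b = b + (j' + 1) := by exact_mod_cast hcontra
        omega
      rw [List.count_replicate, if_neg (ne_true_of_eq_false h0)]
      have hcast : ((b + (j' + 1) : Nat) : Int) = (((b + 1) + j' : Nat) : Int) := by
        congr 1
        omega
      rw [hcast, ih (b + 1) j' (by simpa using Nat.lt_of_succ_lt_succ h)]
      simp

-- ---- B side: acc ----

theorem pvAcc_inner_getD (v : Int) (i : Int) (l : List Int) :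
    ∀ a : PySem.Dict Int Int,
    (l.foldl (fun a s => a.modify s 0 (fun x => x + v)) a).getD i 0 = a.getD i 0 + v * l.count i := by
  induction l with
  | nil => intro a; simp
  | cons s rest ih =>
    intro a
    simp only [List.foldl_cons]
    rw [ih, PySem.Dict.getD_modify]
    by_cases h : i = s
    · subst h
      simp
      ring
    · have : (s == i) = false := by simp [Ne.symm h]
      simp [List.count_cons, this, h]

theorem pvAcc_inner_contains (v : Int) (i : Int) (l : List Int) :
    ∀ a : PySem.Dict Int Int,
    (l.foldl (fun a s => a.modify s 0 (fun x => x + v)) a).contains i = (a.contains i || l.contains i) := by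
  induction l with
  | nil => intro a; simp
  | cons s rest ih =>
    intro a
    simp only [List.foldl_cons]
    rw [ih, PySem.Dict.contains_modify]
    by_cases h : i = s
    · subst h; simp
    · have h1 : (i == s) = false := by simp [h]
      simp [h1, h]

theorem pvAcc_getD (ix : PySem.Dict String (List Int)) (i : Int) (gd : List (String × Int)) :
    ∀ a : PySem.Dict Int Int,
    (gd.foldl (fun acc gv => (ix.getD gv.1 []).foldl (fun a s => a.modify s 0 (fun x => x + gv.2)) acc) a).getD i 0 =
      a.getD i 0 + (gd.map (fun gv => gv.2 * ((ix.getD gv.1 []).count i : Int))).sum := by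
  induction gd with
  | nil => intro a; simp
  | cons gv rest ih =>
    intro a
    simp only [List.foldl_cons, List.map_cons, List.sum_cons]
    rw [ih, pvAcc_inner_getD]
    ring

theorem pvAcc_contains (ix : PySem.Dict String (List Int)) (i : Int) (gd : List (String × Int)) :
    ∀ a : PySem.Dict Int Int,
    (gd.foldl (fun acc gv => (ix.getD gv.1 []).foldl (fun a s => a.modify s 0 (fun x => x + gv.2)) acc) a).contains i =
      (a.contains i || gd.any (fun gv => (ix.getD gv.1 []).contains i)) := by
  induction gd with
  | nil => intro a; simp
  | cons gv rest ih =>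
    intro a
    simp only [List.foldl_cons, List.any_cons]
    rw [ih, pvAcc_inner_contains, Bool.or_assoc]

-- ---- sum exchange ----

theorem pvGetD_filter (q : String) :
    ∀ gd : List (String × Int), (gd.map Prod.fst).Nodup →
    (if (PySem.Dict.mk gd).contains q then (PySem.Dict.mk gd).getD q 0 else 0) =
      ((gd.filter (fun gv => gv.1 == q)).map (fun gv => gv.2)).sum := by
  intro gd
  induction gd with
  | nil => intro _; simp
  | cons gv rest ih =>
    intro hnd
    rw [List.map_cons, List.nodup_cons] at hnd
    obtain ⟨hhead, hnd'⟩ := hnd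
    by_cases h : gv.1 = q
    · have hb : (gv.1 == q) = true := by simp [h]
      have hcont : (PySem.Dict.mk (gv :: rest)).contains q = true := by
        rw [PySem.Dict.contains_mk]
        simp [List.any_cons, hb]
      have hget : (PySem.Dict.mk (gv :: rest)).getD q 0 = gv.2 := by
        rw [PySem.Dict.getD_eq_get?_getD, PySem.Dict.get?_mk_cons, if_pos hb]
        rfl
      have hrest : rest.filter (fun gv' => gv'.1 == q) = [] := by
        rw [List.filter_eq_nil_iff]
        intro gv' hgv' hc
        have hm : gv'.1 ∈ rest.map Prod.fst := List.mem_map_of_mem hgv'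
        have heq : gv.1 = gv'.1 := by
          rw [h, ← (by simpa using hc : gv'.1 = q)]
        exact hhead (heq ▸ hm)
      rw [if_pos hcont, hget, List.filter_cons, if_pos hb, hrest]
      simp
    · have hb : (gv.1 == q) = false := by simp [h]
      have hcont : (PySem.Dict.mk (gv :: rest)).contains q = (PySem.Dict.mk rest).contains q := by
        rw [PySem.Dict.contains_mk, PySem.Dict.contains_mk]
        simp [List.any_cons, hb]
      have hget : (PySem.Dict.mk (gv :: rest)).getD q 0 = (PySem.Dict.mk rest).getD q 0 := by
        rw [PySem.Dict.getD_eq_get?_getD, PySem.Dict.get?_mk_cons, if_neg (ne_true_of_eq_false hb),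
          ← PySem.Dict.getD_eq_get?_getD]
      rw [hcont, hget, List.filter_cons, if_neg (ne_true_of_eq_false hb)]
      exact ih hnd'

theorem pvS_eq_map_ite (G : PySem.Dict String Int) (ps : List String) :
    pvS G ps = (ps.map (fun q => if G.contains q then G.getD q 0 else 0)).sum := by
  induction ps with
  | nil => simp [pvS]
  | cons q rest ih =>
    by_cases h : G.contains q
    · rw [pvS_cons_pos G q rest h]
      simp [h, ih]
    · rw [pvS_cons_neg G q rest (by simpa using h)]
      simp [h, ih]

theorem pvSum_filter_eq (q : String) (gd : List (String × Int)) :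
    (gd.map (fun gv => if gv.1 == q then gv.2 else 0)).sum =
      ((gd.filter (fun gv => gv.1 == q)).map (fun gv => gv.2)).sum := by
  induction gd with
  | nil => simp
  | cons gv rest ih =>
    simp only [List.map_cons, List.sum_cons, List.filter_cons]
    by_cases h : (gv.1 == q) = true
    · rw [if_pos h, if_pos h, List.map_cons, List.sum_cons, ih]
    · rw [if_neg h, if_neg h, ih, zero_add]

theorem pvExchange (gd : List (String × Int)) :
    ∀ ps : List String,
    (ps.map (fun q => ((gd.filter (fun gv => gv.1 == q)).map (fun gv => gv.2)).sum)).sum =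
      (gd.map (fun gv => gv.2 * (ps.count gv.1 : Int))).sum := by
  intro ps
  induction ps with
  | nil =>
    simp only [List.map_nil, List.sum_nil, List.count_nil]
    have : gd.map (fun gv => gv.2 * ((0 : Nat) : Int)) = gd.map (fun _ => (0 : Int)) := by
      apply List.map_congr_left; intro gv _; simp
    rw [this]
    simp
  | cons q ps ih =>
    simp only [List.map_cons, List.sum_cons]
    have h1 : (gd.map (fun gv => gv.2 * (((q :: ps).count gv.1 : Nat) : Int))).sum
        = (gd.map (fun gv => (if gv.1 == q then gv.2 else 0) + gv.2 * ((ps.count gv.1 : Nat) : Int))).sum := by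
      apply congrArg
      apply List.map_congr_left
      intro gv _
      by_cases h : gv.1 = q
      · subst h
        simp
        ring
      · have hb1 : (gv.1 == q) = false := by simp [h]
        have hb2 : (q == gv.1) = false := by simp [Ne.symm h]
        simp [List.count_cons, hb1, hb2]
    rw [h1, PySem.List.sum_map_add_int]
    rw [ih, pvSum_filter_eq]

theorem pvS_counts (gd : List (String × Int)) (hnd : (gd.map Prod.fst).Nodup) (ps : List String) :
    pvS (PySem.Dict.mk gd) ps = (gd.map (fun gv => gv.2 * (ps.count gv.1 : Int))).sum := by
  rw [pvS_eq_map_ite]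
  have h1 : ps.map (fun q => if (PySem.Dict.mk gd).contains q then (PySem.Dict.mk gd).getD q 0 else 0)
      = ps.map (fun q => ((gd.filter (fun gv => gv.1 == q)).map (fun gv => gv.2)).sum) := by
    apply List.map_congr_left
    intro q _
    exact pvGetD_filter q gd hnd
  rw [h1, pvExchange]

-- ---- output fold ----

theorem pvOut_fold_aux (G : PySem.Dict String Int) (acc : PySem.Dict Int Int) :
    ∀ (mcl : List (String × List String)),
    List.Pairwise (fun a b => pvKey a ≠ pvKey b) mcl →
    (∀ j (h : j < mcl.length), acc.contains ((j : Nat) : Int) = pvHit G mcl[j].2) →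
    (∀ j (h : j < mcl.length), acc.getD ((j : Nat) : Int) 0 = pvS G mcl[j].2) →
    ((List.range mcl.length).foldl (fun out k =>
        if acc.contains ((k : Nat) : Int) then
          out.insert ((mcl.map pvKey).getD k "") (acc.getD ((k : Nat) : Int) 0) else out)
      (PySem.Dict.empty : PySem.Dict String Int)).items =
    (mcl.filter (fun cl => pvHit G cl.2)).map (fun cl => (pvKey cl, pvS G cl.2)) := by
  intro mcl
  induction mcl using List.reverseRecOn with
  | nil => intro _ _ _; simp [PySem.Dict.empty]
  | append_singleton mcl' cl ih =>
    intro hdist hc hv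
    have hlen : (mcl' ++ [cl]).length = mcl'.length + 1 := by simp
    rw [hlen, List.range_succ, List.foldl_append]
    have hstep : (List.range mcl'.length).foldl (fun out k =>
        if acc.contains ((k : Nat) : Int) then
          out.insert (((mcl' ++ [cl]).map pvKey).getD k "") (acc.getD ((k : Nat) : Int) 0) else out)
        (PySem.Dict.empty : PySem.Dict String Int) =
        (List.range mcl'.length).foldl (fun out k =>
        if acc.contains ((k : Nat) : Int) then
          out.insert ((mcl'.map pvKey).getD k "") (acc.getD ((k : Nat) : Int) 0) else out)
        (PySem.Dict.empty : PySem.Dict String Int) := by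
      apply PySem.List.foldl_congr_mem
      intro out k hk
      have hk' : k < mcl'.length := List.mem_range.mp hk
      have : ((mcl' ++ [cl]).map pvKey).getD k "" = (mcl'.map pvKey).getD k "" := by
        rw [List.map_append, List.getD_append _ _ _ _ (by simpa using hk')]
      rw [this]
    have hdist' : List.Pairwise (fun a b => pvKey a ≠ pvKey b) mcl' :=
      (List.pairwise_append.mp hdist).1
    have hgetl : ∀ j (h : j < mcl'.length), (mcl' ++ [cl])[j]'(by simp; omega) = mcl'[j] := by
      intro j h
      rw [List.getElem_append_left]
    have ihres := ih hdist'
      (fun j h => by rw [← hgetl j h]; exact hc j (by simp; omega))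
      (fun j h => by rw [← hgetl j h]; exact hv j (by simp; omega))
    rw [hstep]
    set out' := (List.range mcl'.length).foldl (fun out k =>
        if acc.contains ((k : Nat) : Int) then
          out.insert ((mcl'.map pvKey).getD k "") (acc.getD ((k : Nat) : Int) 0) else out)
        (PySem.Dict.empty : PySem.Dict String Int) with hout'
    have hlast : (mcl' ++ [cl])[mcl'.length]'(by simp) = cl := by
      simp
    have hcn : acc.contains ((mcl'.length : Nat) : Int) = pvHit G cl.2 := by
      have := hc mcl'.length (by simp)
      rwa [hlast] at this
    have hvn : acc.getD ((mcl'.length : Nat) : Int) 0 = pvS G cl.2 := by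
      have := hv mcl'.length (by simp)
      rwa [hlast] at this
    by_cases hhit : pvHit G cl.2
    · have hkd : ((mcl' ++ [cl]).map pvKey).getD mcl'.length "" = pvKey cl := by
        have hlm : (mcl' ++ [cl]).map pvKey = mcl'.map pvKey ++ [pvKey cl] := by simp
        rw [hlm, List.getD_eq_getElem?_getD,
          show mcl'.length = (mcl'.map pvKey).length by simp, List.getElem?_concat_length]
        rfl
      have hfresh : out'.contains (pvKey cl) = false := by
        rw [PySem.Dict.contains_eq_decide_mem_keys]
        simp only [decide_eq_false_iff_not]
        intro hmem
        have : out'.keys = out'.items.map Prod.fst := rfl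
        rw [this, ihres] at hmem
        simp only [List.map_map, List.mem_map, List.mem_filter] at hmem
        obtain ⟨a, ⟨ha, _⟩, hkey⟩ := hmem
        exact ((List.pairwise_append.mp hdist).2.2 a ha cl (by simp)) hkey
      simp only [List.foldl_cons, List.foldl_nil, hcn, hhit, if_pos]
      rw [hkd, PySem.Dict.items_insert_of_not_contains _ _ hfresh, ihres, hvn]
      rw [List.filter_append, List.map_append]
      simp [hhit]
    · simp only [List.foldl_cons, List.foldl_nil, hcn]
      rw [if_neg (by simpa using hhit), ihres, List.filter_append]
      have : [cl].filter (fun cl => pvHit G cl.2) = [] := by simp [hhit]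
      rw [this]
      simp

theorem pvOut_fold (G : PySem.Dict String Int) (acc : PySem.Dict Int Int)
    (mcl : List (String × List String))
    (hdist : List.Pairwise (fun a b => pvKey a ≠ pvKey b) mcl)
    (hc : ∀ j (h : j < mcl.length), acc.contains ((j : Nat) : Int) = pvHit G mcl[j].2)
    (hv : ∀ j (h : j < mcl.length), acc.getD ((j : Nat) : Int) 0 = pvS G mcl[j].2) :
    ((PySem.List.pyRange 0 ((mcl.map pvKey).length : Int) 1).foldl (fun out s =>
        if acc.contains s then out.insert (PySem.List.pyGetD (mcl.map pvKey) s "") (acc.getD s 0) else out)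
      (PySem.Dict.empty : PySem.Dict String Int)).items =
    (mcl.filter (fun cl => pvHit G cl.2)).map (fun cl => (pvKey cl, pvS G cl.2)) := by
  have h1 : ((mcl.map pvKey).length : Int) = ((mcl.length : Nat) : Int) := by simp
  rw [h1, PySem.List.pyRange_zero_natCast, List.foldl_map]
  have h2 : (List.range mcl.length).foldl (fun out k =>
      if acc.contains ((k : Nat) : Int) then
        out.insert (PySem.List.pyGetD (mcl.map pvKey) ((k : Nat) : Int) "") (acc.getD ((k : Nat) : Int) 0) else out)
      (PySem.Dict.empty : PySem.Dict String Int) =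
      (List.range mcl.length).foldl (fun out k =>
      if acc.contains ((k : Nat) : Int) then
        out.insert ((mcl.map pvKey).getD k "") (acc.getD ((k : Nat) : Int) 0) else out)
      (PySem.Dict.empty : PySem.Dict String Int) := by
    apply PySem.List.foldl_congr_mem
    intro out k _
    rw [PySem.List.pyGetD_natCast]
  rw [h2]
  exact pvOut_fold_aux G acc mcl hdist hc hv

-- ---- A side: full characterization of the fold (including singleton overwrites) ----

def pvOver (cls : List (String × List String)) (k : String) : Bool := cls.any (fun c => c.2 == [k])

def pvASpec (G : PySem.Dict String Int) : List (String × List String) → List (String × Int)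
  | [] => []
  | c :: r =>
    if pvGood G c then
      (pvKey c, if pvOver r (pvKey c) then G.getD (pvKey c) 0 else pvS G c.2) :: pvASpec G r
    else pvASpec G r

def pvPatch (G : PySem.Dict String Int) (cls : List (String × List String)) (l : List (String × Int)) : List (String × Int) :=
  l.map (fun kv => if pvOver cls kv.1 then (kv.1, G.getD kv.1 0) else kv)

theorem pvAFold_items (G : PySem.Dict String Int) :
    ∀ (cls : List (String × List String)) (ns : PySem.Dict String Int),
    (∀ c ∈ cls, pvGood G c = true → ns.contains (pvKey c) = false) →
    List.Pairwise (fun a b => pvKey a ≠ pvKey b) cls →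
    (cls.foldl (fun new_stats cl =>
      if cl.2.length == 1 then
        if new_stats.contains (cl.2.headD "") then new_stats.insert (cl.2.headD "") (G.getD (cl.2.headD "") 0)
        else new_stats
      else pvAInner G ("cluster_" ++ cl.1) new_stats cl.2) ns).items =
    pvPatch G cls ns.items ++ pvASpec G cls := by
  intro cls
  induction cls with
  | nil => intro ns _ _; simp [pvASpec, pvPatch, pvOver]
  | cons cl rest ih =>
    intro ns hfresh hpair
    simp only [List.foldl_cons]
    by_cases hl : cl.2.length == 1
    · obtain ⟨p, hp⟩ := List.length_eq_one_iff.mp (by simpa using hl)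
      have hhead : cl.2.headD "" = p := by rw [hp]; rfl
      have hgood : pvGood G cl = false := by simp [pvGood, hp]
      have hspec : pvASpec G (cl :: rest) = pvASpec G rest := by
        rw [pvASpec, hgood]; simp
      rw [if_pos hl, hhead]
      by_cases hc : ns.contains p
      · rw [if_pos hc]
        have hfresh' : ∀ c ∈ rest, pvGood G c = true → (ns.insert p (G.getD p 0)).contains (pvKey c) = false := by
          intro c hcm hg
          have h0 : ns.contains (pvKey c) = false := hfresh c (List.mem_cons_of_mem _ hcm) hg
          have hne : pvKey c ≠ p := by intro h; rw [h] at h0; rw [h0] at hc; simp at hc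
          rw [PySem.Dict.contains_insert]
          simp [hne, h0]
        rw [ih _ hfresh' hpair.of_cons, hspec]
        congr 1
        rw [PySem.Dict.items_insert_of_contains _ _ hc]
        unfold pvPatch
        rw [List.map_map]
        apply List.map_congr_left
        intro kv _
        by_cases hk : kv.1 = p
        · have hb : (kv.1 == p) = true := by simp [hk]
          have ho : pvOver (cl :: rest) kv.1 = true := by
            simp [pvOver, hp, hk]
          simp only [Function.comp, hb, if_pos, ho]
          by_cases h2 : pvOver rest (p : String)
          · simp [h2, hk]
          · simp [h2, hk]
        · have hb : (kv.1 == p) = false := by simp [hk]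
          have ho : pvOver (cl :: rest) kv.1 = pvOver rest kv.1 := by
            simp [pvOver, hp, Ne.symm hk]
          simp only [Function.comp, hb]
          simp [ho]
      · rw [if_neg hc]
        rw [ih _ (fun c hcm hg => hfresh c (List.mem_cons_of_mem _ hcm) hg) hpair.of_cons, hspec]
        congr 1
        unfold pvPatch
        apply List.map_congr_left
        intro kv hkv
        have hk : kv.1 ≠ p := by
          intro h
          have : ns.contains kv.1 = true := by
            rw [PySem.Dict.contains_eq_decide_mem_keys]
            simp only [decide_eq_true_eq]
            show kv.1 ∈ ns.items.map Prod.fst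
            exact List.mem_map_of_mem hkv
          rw [h] at this; rw [this] at hc; simp at hc
        have ho : pvOver (cl :: rest) kv.1 = pvOver rest kv.1 := by
          simp [pvOver, hp, Ne.symm hk]
        rw [ho]
    · have hl' : (cl.2.length != 1) = true := by simpa using hl
      have hnotsing : ∀ k : String, (cl.2 == [k]) = false := by
        intro k
        rw [beq_eq_false_iff_ne]
        intro h
        rw [h] at hl
        simp at hl
      have ho : ∀ k : String, pvOver (cl :: rest) k = pvOver rest k := by
        intro k
        simp [pvOver, hnotsing k]
      have hpatch : pvPatch G (cl :: rest) ns.items = pvPatch G rest ns.items := by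
        unfold pvPatch
        apply List.map_congr_left
        intro kv _
        rw [ho]
      rw [if_neg (by simpa using hl), pvAInner_eq]
      have hkey : ns.contains (pvKey cl) = false ∨ pvHit G cl.2 = false := by
        by_cases hhit : pvHit G cl.2
        · left
          exact hfresh cl (List.mem_cons_self) (by simp [pvGood, hl', hhit])
        · right; simpa using hhit
      by_cases hhit : pvHit G cl.2
      · have hgood : pvGood G cl = true := by simp [pvGood, hl', hhit]
        have hkey' : ns.contains (pvKey cl) = false := by
          rcases hkey with h | h
          · exact h
          · rw [h] at hhit; simp at hhit
        rw [if_pos hhit]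
        have hget0 : ns.getD ("cluster_" ++ cl.1) 0 = 0 :=
          PySem.Dict.getD_of_not_contains _ _ hkey'
        rw [hget0, zero_add]
        have hfresh' : ∀ c ∈ rest, pvGood G c = true →
            (ns.insert ("cluster_" ++ cl.1) (pvS G cl.2)).contains (pvKey c) = false := by
          intro c hcm hg
          have h0 : ns.contains (pvKey c) = false := hfresh c (List.mem_cons_of_mem _ hcm) hg
          have hne : pvKey c ≠ pvKey cl := ((List.pairwise_cons.mp hpair).1 c hcm).symm
          rw [PySem.Dict.contains_insert]
          simp only [pvKey] at hne
          simp only [pvKey] at h0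
          simp [pvKey, hne, h0]
        rw [ih _ hfresh' hpair.of_cons]
        rw [show ("cluster_" ++ cl.1 : String) = pvKey cl from rfl,
          PySem.Dict.items_insert_of_not_contains _ _ hkey']
        rw [show pvPatch G rest (ns.items ++ [(pvKey cl, pvS G cl.2)]) =
            pvPatch G rest ns.items ++ pvPatch G rest [(pvKey cl, pvS G cl.2)] by
          unfold pvPatch; rw [List.map_append]]
        rw [hpatch, pvASpec, hgood]
        simp only [if_pos]
        have hone : pvPatch G rest [(pvKey cl, pvS G cl.2)] =
            [(pvKey cl, if pvOver rest (pvKey cl) then G.getD (pvKey cl) 0 else pvS G cl.2)] := by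
          unfold pvPatch
          simp only [List.map_cons, List.map_nil]
          by_cases h2 : pvOver rest (pvKey cl)
          · rw [h2]; simp
          · have h2' : pvOver rest (pvKey cl) = false := by simpa using h2
            rw [h2']; simp
        rw [hone]
        simp
      · have hgood : pvGood G cl = false := by simp [pvGood, hhit]
        rw [if_neg (by simpa using hhit)]
        rw [ih _ (fun c hcm hg => hfresh c (List.mem_cons_of_mem _ hcm) hg) hpair.of_cons]
        rw [hpatch, pvASpec, hgood]
        simp

-- the spec when no effective overwrite changes a value
theorem pvASpec_eq_of_pairwise (G : PySem.Dict String Int) :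
    ∀ cls : List (String × List String),
    List.Pairwise (fun c s => pvGood G c = true → s.2 = [pvKey c] → G.getD (pvKey c) 0 = pvS G c.2) cls →
    pvASpec G cls = (cls.filter (pvGood G)).map (fun c => (pvKey c, pvS G c.2)) := by
  intro cls
  induction cls with
  | nil => intro _; rfl
  | cons c rest ih =>
    intro hpw
    obtain ⟨hR, hpw'⟩ := List.pairwise_cons.mp hpw
    rw [pvASpec, List.filter_cons]
    by_cases hg : pvGood G c
    · rw [if_pos hg, hg]
      simp only [if_pos]
      rw [ih hpw', List.map_cons]
      congr 2
      by_cases hov : pvOver rest (pvKey c)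
      · rw [if_pos hov]
        obtain ⟨src, hsrc, hb⟩ := List.any_eq_true.mp hov
        exact hR src hsrc hg (by simpa using hb)
      · rw [if_neg hov]
    · have hg' : pvGood G c = false := by simpa using hg
      rw [hg', ih hpw']
      simp

-- if the spec coincides with the clean per-cluster sums, every overwritten value agreed
theorem pvASpec_forces (G : PySem.Dict String Int) :
    ∀ cls : List (String × List String),
    pvASpec G cls = (cls.filter (pvGood G)).map (fun c => (pvKey c, pvS G c.2)) →
    ∀ i j (hij : i < j) (hj : j < cls.length), pvGood G (cls[i]'(by omega)) = true →
      (cls[j]'hj).2 = [pvKey (cls[i]'(by omega))] →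
      G.getD (pvKey (cls[i]'(by omega))) 0 = pvS G ((cls[i]'(by omega)).2) := by
  intro cls
  induction cls with
  | nil => intro _ i j _ hj; simp at hj
  | cons c rest ih =>
    intro heq i j hij hj
    match i, j with
    | 0, j' + 1 =>
      intro hgood hsing
      simp only [List.getElem_cons_zero] at hgood hsing ⊢
      simp only [List.getElem_cons_succ] at hsing
      rw [pvASpec, hgood, List.filter_cons, hgood] at heq
      simp only [if_pos] at heq
      rw [List.map_cons] at heq
      have hhead := (List.cons.injEq _ _ _ _).mp heq |>.1
      have hov : pvOver rest (pvKey c) = true := by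
        rw [pvOver, List.any_eq_true]
        refine ⟨rest[j']'(by simpa using Nat.lt_of_succ_lt_succ hj), List.getElem_mem _, ?_⟩
        simp [hsing]
      rw [hov] at hhead
      simpa using (Prod.mk.injEq _ _ _ _).mp hhead |>.2
    | i' + 1, j' + 1 =>
      intro hgood hsing
      simp only [List.getElem_cons_succ] at hgood hsing ⊢
      have htail : pvASpec G rest = (rest.filter (pvGood G)).map (fun c => (pvKey c, pvS G c.2)) := by
        by_cases hg : pvGood G c
        · rw [pvASpec, hg, List.filter_cons, hg] at heq
          simp only [if_pos] at heq
          rw [List.map_cons] at heq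
          exact ((List.cons.injEq _ _ _ _).mp heq).2
        · have hg' : pvGood G c = false := by simpa using hg
          rw [pvASpec, hg', List.filter_cons, hg'] at heq
          simpa using heq
      exact ih htail i' j' (by omega) (by simpa using Nat.lt_of_succ_lt_succ hj) hgood hsing

-- ---- dictionary lookups from the association list ----

theorem pvGetD_of_mem :
    ∀ gd : List (String × Int), (gd.map Prod.fst).Nodup →
      ∀ gv ∈ gd, (PySem.Dict.mk gd).getD gv.1 0 = gv.2 := by
  intro gd
  induction gd with
  | nil => intro _ gv hgv; simp at hgv
  | cons hd tl ih =>
    intro hnd gv hgv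
    rw [List.map_cons, List.nodup_cons] at hnd
    obtain ⟨hhead, hnd'⟩ := hnd
    rcases List.mem_cons.mp hgv with h | h
    · subst h
      rw [PySem.Dict.getD_eq_get?_getD, PySem.Dict.get?_mk_cons]
      simp
    · have hne : (hd.1 == gv.1) = false := by
        rw [beq_eq_false_iff_ne]
        intro hc
        exact hhead (hc ▸ List.mem_map_of_mem h)
      rw [PySem.Dict.getD_eq_get?_getD, PySem.Dict.get?_mk_cons, if_neg (ne_true_of_eq_false hne),
        ← PySem.Dict.getD_eq_get?_getD]
      exact ih hnd' gv h

theorem pvHit_mk_iff (gd : List (String × Int)) (ps : List String) :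
    pvHit (PySem.Dict.mk gd) ps = true ↔ ∃ q ∈ ps, q ∈ gd.map Prod.fst := by
  rw [pvHit, List.any_eq_true]
  constructor
  · rintro ⟨q, hq, hcq⟩
    rw [PySem.Dict.contains_mk, List.any_eq_true] at hcq
    obtain ⟨gv, hgv, hb⟩ := hcq
    refine ⟨q, hq, ?_⟩
    have : gv.1 = q := by simpa using hb
    exact this ▸ List.mem_map_of_mem hgv
  · rintro ⟨q, hq, hm⟩
    obtain ⟨gv, hgv, hq1⟩ := List.mem_map.mp hm
    refine ⟨q, hq, ?_⟩
    rw [PySem.Dict.contains_mk, List.any_eq_true]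
    exact ⟨gv, hgv, by simp [hq1]⟩

theorem pvKeys_pairwise (clusters : List (String × List String))
    (hndc : (clusters.map Prod.fst).Nodup) :
    List.Pairwise (fun a b => pvKey a ≠ pvKey b) clusters := by
  have := List.pairwise_map.mp hndc
  exact this.imp (fun {a b} h => by
    intro hc
    exact h (by
      have : a.1 = b.1 := (String.append_right_inj "cluster_").mp hc
      rw [this]))

-- ---- per-file results ----

theorem pvAFile_eq (clusters : List (String × List String)) (gd : List (String × Int))
    (hndc : (clusters.map Prod.fst).Nodup) :
    (pvAFile clusters (PySem.Dict.mk gd)).items = pvASpec (PySem.Dict.mk gd) clusters := by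
  rw [pvAFile, pvAFold_items (PySem.Dict.mk gd) clusters PySem.Dict.empty
    (fun _ _ _ => by simp) (pvKeys_pairwise clusters hndc)]
  have : (PySem.Dict.empty : PySem.Dict String Int).items = [] := by simp [PySem.Dict.empty]
  rw [this]
  simp [pvPatch]

theorem pvBFile_eq (clusters : List (String × List String)) (gd : List (String × Int))
    (hndc : (clusters.map Prod.fst).Nodup) (hndg : (gd.map Prod.fst).Nodup) :
    pvBFile (pvBIndex clusters).1 (pvBIndex clusters).2 gd =
      (clusters.filter (pvGood (PySem.Dict.mk gd))).map (fun cl => (pvKey cl, pvS (PySem.Dict.mk gd) cl.2)) := by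
  set mcl := clusters.filter (fun cl => cl.2.length != 1) with hmcl
  have hspec := fun g => pvBIndex_spec g clusters [] PySem.Dict.empty
  have hms : (pvBIndex clusters).1 = mcl.map pvKey := by
    have := (hspec "").1
    rw [pvBIndex]
    simpa using this
  have hix : ∀ g, (pvBIndex clusters).2.getD g [] = pvSlots 0 mcl g := by
    intro g
    have := (hspec g).2
    rw [pvBIndex]
    simpa using this
  rw [pvBFile, hms]
  set acc := gd.foldl (fun acc gv => ((pvBIndex clusters).2.getD gv.1 []).foldl
    (fun a s => a.modify s 0 (fun x => x + gv.2)) acc) (PySem.Dict.empty : PySem.Dict Int Int) with hacc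
  have hdist : List.Pairwise (fun a b => pvKey a ≠ pvKey b) mcl :=
    (pvKeys_pairwise clusters hndc).sublist List.filter_sublist
  have hcont : ∀ j (h : j < mcl.length), acc.contains ((j : Nat) : Int) = pvHit (PySem.Dict.mk gd) mcl[j].2 := by
    intro j h
    rw [hacc, pvAcc_contains]
    have hcnt : ∀ g : String, (pvSlots 0 mcl g).count ((j : Nat) : Int) = mcl[j].2.count g := by
      intro g
      have := pvSlots_count g mcl 0 j h
      rwa [show ((0 + j : Nat) : Int) = ((j : Nat) : Int) by simp] at this
    rcases Bool.eq_false_or_eq_true (pvHit (PySem.Dict.mk gd) mcl[j].2) with hh | hh <;> rw [hh]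
    · rw [pvHit, List.any_eq_true] at hh
      obtain ⟨q, hq', hcq⟩ := hh
      rw [PySem.Dict.contains_mk, List.any_eq_true] at hcq
      obtain ⟨gv, hgv, hqq⟩ := hcq
      simp only [PySem.Dict.contains_empty, Bool.false_or]
      rw [List.any_eq_true]
      refine ⟨gv, hgv, ?_⟩
      rw [hix]
      simp only [List.contains_eq_mem, decide_eq_true_eq]
      have hq1 : gv.1 = q := by simpa using hqq
      have hmem2 : gv.1 ∈ mcl[j].2 := hq1 ▸ hq'
      apply List.count_pos_iff.mp
      rw [hcnt]
      exact List.count_pos_iff.mpr hmem2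
    · rw [pvHit, List.any_eq_false] at hh
      simp only [PySem.Dict.contains_empty, Bool.false_or]
      rw [List.any_eq_false]
      intro gv hgv
      rw [hix]
      simp only [List.contains_eq_mem]
      intro hmem
      have hmem' : ((j : Nat) : Int) ∈ pvSlots 0 mcl gv.1 := by simpa using hmem
      have hpos : 0 < (pvSlots 0 mcl gv.1).count ((j : Nat) : Int) := List.count_pos_iff.mpr hmem'
      rw [hcnt] at hpos
      have hmem2 : gv.1 ∈ mcl[j].2 := List.count_pos_iff.mp hpos
      have hfalse := hh gv.1 hmem2
      rw [PySem.Dict.contains_mk, Bool.not_eq_true, List.any_eq_false] at hfalse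
      exact absurd (by simp : (gv.1 == gv.1) = true) (by simpa using hfalse gv hgv)
  have hval : ∀ j (h : j < mcl.length), acc.getD ((j : Nat) : Int) 0 = pvS (PySem.Dict.mk gd) mcl[j].2 := by
    intro j h
    rw [hacc, pvAcc_getD]
    rw [PySem.Dict.getD_empty, zero_add]
    rw [pvS_counts gd hndg]
    apply congrArg
    apply List.map_congr_left
    intro gv _
    rw [hix]
    have hcnt : (pvSlots 0 mcl gv.1).count ((0 + j : Nat) : Int) = mcl[j].2.count gv.1 :=
      pvSlots_count gv.1 mcl 0 j h
    rw [show ((0 + j : Nat) : Int) = ((j : Nat) : Int) by simp] at hcnt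
    rw [hcnt]
  rw [pvOut_fold (PySem.Dict.mk gd) acc mcl hdist hcont hval]
  have hff : clusters.filter (pvGood (PySem.Dict.mk gd)) = mcl.filter (fun cl => pvHit (PySem.Dict.mk gd) cl.2) := by
    rw [hmcl, List.filter_filter]
    apply List.filter_congr
    intro cl _
    rw [pvGood, Bool.and_comm]
  rw [hff]

-- a quirk-pattern-free file yields the pairwise no-overwrite property
theorem pvR_of (clusters : List (String × List String)) (gd : List (String × Int))
    (hndg : (gd.map Prod.fst).Nodup)
    (hq : ∀ ci ∈ clusters.zipIdx, ∀ a ∈ clusters.take ci.2,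
      a.2.length ≠ 1 → ci.1.2 = ["cluster_" ++ a.1] → (∃ q ∈ a.2, q ∈ gd.map Prod.fst) →
      ∃ gv ∈ gd, gv.1 = "cluster_" ++ a.1 ∧ gv.2 = (gd.map (fun x => x.2 * (a.2.count x.1 : Int))).sum) :
    List.Pairwise (fun c s => pvGood (PySem.Dict.mk gd) c = true → s.2 = [pvKey c] →
      (PySem.Dict.mk gd).getD (pvKey c) 0 = pvS (PySem.Dict.mk gd) c.2) clusters := by
  rw [List.pairwise_iff_getElem]
  intro i j hi hj hij hgood hsing
  have hmemz : (clusters[j], j) ∈ clusters.zipIdx := by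
    have hl : j < clusters.zipIdx.length := by simp [List.length_zipIdx]; omega
    have : clusters.zipIdx[j] = (clusters[j], j) := by
      rw [List.getElem_zipIdx]
      simp
    exact this ▸ List.getElem_mem hl
  have hmemt : clusters[i] ∈ clusters.take j := by
    have hlen : i < (clusters.take j).length := by
      simp [List.length_take]; omega
    have : (clusters.take j)[i] = clusters[i] := List.getElem_take
    exact this ▸ List.getElem_mem hlen
  obtain ⟨h1, h2⟩ := Bool.and_eq_true_iff.mp (by rw [pvGood] at hgood; exact hgood)
  obtain ⟨gv, hgv, hfst, hvaleq⟩ := hq (clusters[j], j) hmemz clusters[i] hmemt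
    (by simpa using h1) (by simpa [pvKey] using hsing) ((pvHit_mk_iff gd _).mp h2)
  have hkey : pvKey clusters[i] = gv.1 := by rw [hfst]; rfl
  rw [hkey, pvGetD_of_mem gd hndg gv hgv, pvS_counts gd hndg, hvaleq]

-- ===== VERDICT (by name: the statement is the Claim_ definition above) =====
theorem merge_by_clusters_spec : Claim_unchanged_merge_by_clusters := by
  intro clusters stats_file _ hpre hD
  obtain ⟨hndc, hndf, hndg, hnr⟩ := hpre
  rw [merge_by_clusters, merge_by_clusters_alt]
  rw [PySem.Dict.items_foldl_insert_fresh stats_file Prod.fst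
      (fun fg => (pvAFile clusters (PySem.Dict.mk fg.2)).items) PySem.Dict.empty
      (fun _ _ => by simp) hndf]
  rw [PySem.Dict.items_foldl_insert_fresh stats_file Prod.fst
      (fun fg => pvBFile (pvBIndex clusters).1 (pvBIndex clusters).2 fg.2) PySem.Dict.empty
      (fun _ _ => by simp) hndf]
  simp only [PySem.Dict.empty, List.nil_append]
  apply List.map_congr_left
  intro fg hfg
  have hq : ∀ ci ∈ clusters.zipIdx, ∀ a ∈ clusters.take ci.2,
      a.2.length ≠ 1 → ci.1.2 = ["cluster_" ++ a.1] → (∃ q ∈ a.2, q ∈ fg.2.map Prod.fst) →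
      ∃ gv ∈ fg.2, gv.1 = "cluster_" ++ a.1 ∧ gv.2 = (fg.2.map (fun x => x.2 * (a.2.count x.1 : Int))).sum := by
    intro ci hci a ha hlen hsing hhit
    by_cases hm : ("cluster_" ++ a.1) ∈ fg.2.map Prod.fst
    · obtain ⟨gv, hgv, hfst⟩ := List.mem_map.mp hm
      by_cases hval : gv.2 = (fg.2.map (fun x => x.2 * (a.2.count x.1 : Int))).sum
      · exact ⟨gv, hgv, hfst, hval⟩
      · have hval' : gv.2 ≠ (fg.2.map (fun x => a.2.count x.1 • x.2)).sum := by
          rw [pvSum_smul]; exact hval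
        exact absurd ⟨fg, hfg, ci, hci, a, ha, gv, hgv, hlen, hfst, by rw [hsing, hfst], hhit, hval'⟩ hD
    · exact absurd ⟨fg, hfg, ci, hci, a, ha, hlen, hsing, hm, hhit⟩ hnr
  have hA := pvAFile_eq clusters fg.2 hndc
  have hB := pvBFile_eq clusters fg.2 hndc (hndg fg hfg)
  have hS := pvASpec_eq_of_pairwise (PySem.Dict.mk fg.2) clusters
    (pvR_of clusters fg.2 (hndg fg hfg) hq)
  rw [hA, hB, hS]

theorem merge_by_clusters_changed : Claim_changed_merge_by_clusters := by
  unfold Claim_changed_merge_by_clusters; decide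

theorem merge_by_clusters_tight : Claim_exact_merge_by_clusters := by
  intro clusters stats_file _ hpre hD heq
  obtain ⟨hndc, hndf, hndg, _⟩ := hpre
  obtain ⟨fg, hfg, ci, hci, a, ha, gv, hgv, hlen, hfst, hsing0, hhit, hval0⟩ := hD
  have hsing : ci.1.2 = ["cluster_" ++ a.1] := by rw [hsing0, hfst]
  have hval : gv.2 ≠ (fg.2.map (fun x => x.2 * (a.2.count x.1 : Int))).sum := by
    rw [← pvSum_smul]; exact hval0
  rw [merge_by_clusters, merge_by_clusters_alt] at heq
  rw [PySem.Dict.items_foldl_insert_fresh stats_file Prod.fst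
      (fun fg => (pvAFile clusters (PySem.Dict.mk fg.2)).items) PySem.Dict.empty
      (fun _ _ => by simp) hndf] at heq
  rw [PySem.Dict.items_foldl_insert_fresh stats_file Prod.fst
      (fun fg => pvBFile (pvBIndex clusters).1 (pvBIndex clusters).2 fg.2) PySem.Dict.empty
      (fun _ _ => by simp) hndf] at heq
  simp only [PySem.Dict.empty, List.nil_append] at heq
  have hfile := List.map_inj_left.mp heq fg hfg
  have hitems : (pvAFile clusters (PySem.Dict.mk fg.2)).items =
      pvBFile (pvBIndex clusters).1 (pvBIndex clusters).2 fg.2 :=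
    congrArg Prod.snd hfile
  rw [pvAFile_eq clusters fg.2 hndc, pvBFile_eq clusters fg.2 hndc (hndg fg hfg)] at hitems
  -- indices from the D_ witness
  obtain ⟨-, hjlt0, hjget0⟩ := List.mem_zipIdx hci
  have hjlt : ci.2 < clusters.length := by omega
  have hjget : ci.1 = clusters[ci.2]'hjlt := by simpa using hjget0
  obtain ⟨i, hilt, higet⟩ := List.getElem_of_mem ha
  have hilt' : i < ci.2 := by
    have := hilt
    rw [List.length_take] at this
    omega
  have hige : clusters[i]'(by omega) = a := (List.getElem_take).symm.trans higet
  have hgood : pvGood (PySem.Dict.mk fg.2) (clusters[i]'(by omega)) = true := by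
    rw [hige, pvGood, Bool.and_eq_true_iff]
    exact ⟨by simpa using hlen, (pvHit_mk_iff fg.2 a.2).mpr hhit⟩
  have hsing' : (clusters[ci.2]'hjlt).2 = [pvKey (clusters[i]'(by omega))] := by
    rw [← hjget, hige]
    simpa [pvKey] using hsing
  have hforced := pvASpec_forces (PySem.Dict.mk fg.2) clusters hitems i ci.2 hilt' hjlt hgood hsing'
  rw [hige, show pvKey a = gv.1 from by rw [hfst]; rfl] at hforced
  rw [pvGetD_of_mem fg.2 (hndg fg hfg) gv hgv, pvS_counts fg.2 (hndg fg hfg)] at hforced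
  exact hval hforced
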